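-- pv_equiv track=rewrite | github.com/noxe-jkl/usb-site-lock | usb_site_lock.py | add_block_entries
-- ===== SOURCE A (Python) =====
-- BLOCKED_SITES = [
--     "youtube.com",
--     "www.youtube.com",
--     "twitter.com",
--     "www.twitter.com",
--     "x.com",
--     "www.x.com",
-- ]
--
-- REDIRECT_IP = "127.0.0.1"
--
-- MARKER_START = "# >>> USB_SITE_LOCK_START <<<"
--
-- MARKER_END = "# >>> USB_SITE_LOCK_END <<<"
--
-- def remove_block_entries(content: str) -> str:
--     """Remove our blocking entries from hosts content."""
--     lines = content.split('\n')
--     result = []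
--     in_block = False
--
--     for line in lines:
--         if MARKER_START in line:
--             in_block = True
--             continue
--         elif MARKER_END in line:
--             in_block = False
--             continue
--         elif not in_block:
--             result.append(line)
--
--     # Clean up multiple blank lines at end
--     while result and result[-1] == '':
--         result.pop()
--     result.append('')  # Ensure single trailing newline
--
--     return '\n'.join(result)
--
-- def add_block_entries(content: str) -> str:
--     """Add our blocking entries to hosts content."""
--     # First remove any existing entries
--     content = remove_block_entries(content)
--
--     # Build the block entries
--     block_lines = [MARKER_START]
--     for site in BLOCKED_SITES:
--         block_lines.append(f"{REDIRECT_IP}\t{site}")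
--     block_lines.append(MARKER_END)
--
--     # Ensure content ends with newline before adding our block
--     if not content.endswith('\n'):
--         content += '\n'
--
--     return content + '\n'.join(block_lines) + '\n'
-- ===== SOURCE B (Python) =====
-- BLOCKED_SITES = [
--     "youtube.com",
--     "www.youtube.com",
--     "twitter.com",
--     "www.twitter.com",
--     "x.com",
--     "www.x.com",
-- ]
--
-- REDIRECT_IP = "127.0.0.1"
--
-- MARKER_START = "# >>> USB_SITE_LOCK_START <<<"
--
-- MARKER_END = "# >>> USB_SITE_LOCK_END <<<"
--
--
-- def add_block_entries(content: str) -> str: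
--     """Add our blocking entries to hosts content (single pass, span skipping)."""
--     lines = content.split('\n')
--     kept = []
--     i = 0
--     n = len(lines)
--     while i < n:
--         ln = lines[i]
--         if MARKER_START in ln:
--             # skip the whole block: everything up to and including the next
--             # closing line (a line containing START keeps the block open)
--             i += 1
--             while i < n and (MARKER_START in lines[i] or MARKER_END not in lines[i]):
--                 i += 1
--             i += 1
--         elif MARKER_END in ln:
--             i += 1
--         else:
--             kept.append(ln)
--             i += 1
--     # trim trailing blank lines by shrinking the slice bound
--     k = len(kept)
--     while k > 0 and kept[k - 1] == '':
--         k -= 1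
--     block = [MARKER_START] + [f"{REDIRECT_IP}\t{site}" for site in BLOCKED_SITES] + [MARKER_END]
--     return '\n'.join(kept[:k]) + '\n' + '\n'.join(block) + '\n'
-- ===== Notes on version B (the rewrite author's own statement) =====
-- stated objective: alternative
-- what changed: B replaces A's remove-then-readd structure (a per-line in_block flag pass, a pop-from-end cleanup, and an endswith-newline patch) by one index loop that skips whole marker-delimited spans with a nested scan, trims trailing blanks via a slice bound, and assembles the result in a single join expression.
import Mathlib
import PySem

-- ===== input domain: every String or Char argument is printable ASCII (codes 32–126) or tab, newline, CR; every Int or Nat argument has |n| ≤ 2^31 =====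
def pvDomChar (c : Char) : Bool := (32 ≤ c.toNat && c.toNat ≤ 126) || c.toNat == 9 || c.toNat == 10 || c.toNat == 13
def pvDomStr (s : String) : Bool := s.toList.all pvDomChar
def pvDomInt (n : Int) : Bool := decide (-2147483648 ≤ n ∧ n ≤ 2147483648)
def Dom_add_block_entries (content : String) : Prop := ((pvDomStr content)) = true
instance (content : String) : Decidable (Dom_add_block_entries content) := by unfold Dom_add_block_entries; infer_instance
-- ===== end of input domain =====

-- B replaces A's per-line in_block flag pass (plus remove/re-add split) by a single
-- index loop that skips whole marker-delimited spans and assembles the result in one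
-- expression (objective: alternative structure, same cost).

-- ===== PORT A =====
def pvMarkerStart : List Char := "# >>> USB_SITE_LOCK_START <<<".toList
def pvMarkerEnd : List Char := "# >>> USB_SITE_LOCK_END <<<".toList
def pvRedirectIp : List Char := "127.0.0.1".toList
def pvBlockedSites : List (List Char) :=
  ["youtube.com".toList, "www.youtube.com".toList, "twitter.com".toList,
   "www.twitter.com".toList, "x.com".toList, "www.x.com".toList]

-- body of A's for-loop in remove_block_entries: state = (result, in_block)
def pvStepA (st : List (List Char) × Bool) (line : List Char) : List (List Char) × Bool :=
  if PySem.Chars.isIn pvMarkerStart line then (st.1, true)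
  else if PySem.Chars.isIn pvMarkerEnd line then (st.1, false)
  else if st.2 = false then (st.1 ++ [line], st.2)
  else st

def add_block_entries (content : String) : String :=
  -- remove_block_entries inlined: split, flag loop, pop trailing blanks, append ''
  let lines := PySem.Chars.splitOn content.toList ['\n']
  let result := (lines.foldl pvStepA ([], false)).1
  -- 'while result and result[-1] == "": result.pop()' (pop-from-end loop, exact)
  let result := (result.reverse.dropWhile (· == [])).reverse
  let result := result ++ [[]]
  let cleaned := PySem.Chars.join ['\n'] result
  -- add_block_entries proper
  let blockLines := pvBlockedSites.foldl
    (fun acc site => acc ++ [pvRedirectIp ++ ['\t'] ++ site]) [pvMarkerStart]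
  let blockLines := blockLines ++ [pvMarkerEnd]
  let cleaned := if PySem.Chars.endswith cleaned ['\n'] then cleaned else cleaned ++ ['\n']
  String.ofList (cleaned ++ PySem.Chars.join ['\n'] blockLines ++ ['\n'])

-- ===== PORT B =====
-- inner while of Source B: advance past block lines, then past the closing line
def pvSkipB : List (List Char) → List (List Char)
  | [] => []
  | l :: t =>
    if PySem.Chars.isIn pvMarkerStart l || !PySem.Chars.isIn pvMarkerEnd l then pvSkipB t
    else t

theorem pvSkipB_length_le : ∀ t : List (List Char), (pvSkipB t).length ≤ t.length := by
  intro t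
  induction t with
  | nil => simp [pvSkipB]
  | cons l t ih =>
    simp only [pvSkipB]
    split
    · exact Nat.le_succ_of_le ih
    · simp

-- outer while of Source B, collecting kept lines
def pvCleanB : List (List Char) → List (List Char)
  | [] => []
  | l :: t =>
    if PySem.Chars.isIn pvMarkerStart l then pvCleanB (pvSkipB t)
    else if PySem.Chars.isIn pvMarkerEnd l then pvCleanB t
    else l :: pvCleanB t
termination_by ls => ls.length
decreasing_by
  · have := pvSkipB_length_le t; simp; omega
  · simp
  · simp

def add_block_entries_alt (content : String) : String :=
  let lines := PySem.Chars.splitOn content.toList ['\n']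
  let kept := pvCleanB lines
  -- 'k = len(kept); while k > 0 and kept[k-1] == "": k -= 1' then kept[:k]
  let k := kept.length - (kept.reverse.takeWhile (· == [])).length
  let block := [pvMarkerStart] ++ pvBlockedSites.map (fun site => pvRedirectIp ++ ['\t'] ++ site)
               ++ [pvMarkerEnd]
  String.ofList (PySem.Chars.join ['\n'] (kept.take k) ++ ['\n']
             ++ PySem.Chars.join ['\n'] block ++ ['\n'])

-- ===== PRECONDITION & SPEC =====
def Spec_add_block_entries (content : String) (out : String) : Prop := out = add_block_entries_alt content
instance (content : String) (out : String) : Decidable (Spec_add_block_entries content out) := by unfold Spec_add_block_entries; infer_instance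

-- ===== CLAIM (what is proved, stated in full; the proofs are below) =====
def Claim_equal_add_block_entries : Prop := ∀ (content : String), Dom_add_block_entries content → Spec_add_block_entries content (add_block_entries content)

-- ===== LEMMAS AND PROOFS =====

-- A's kept lines, as a recursion on (in_block, remaining lines)
def pvKeepA (b : Bool) : List (List Char) → List (List Char)
  | [] => []
  | l :: t =>
    if PySem.Chars.isIn pvMarkerStart l then pvKeepA true t
    else if PySem.Chars.isIn pvMarkerEnd l then pvKeepA false t
    else if b then pvKeepA b t
    else l :: pvKeepA b t

theorem pvFoldA_eq_keep : ∀ (lines : List (List Char)) (acc : List (List Char)) (b : Bool),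
    (lines.foldl pvStepA (acc, b)).1 = acc ++ pvKeepA b lines := by
  intro lines
  induction lines with
  | nil => intro acc b; simp [pvKeepA]
  | cons l t ih =>
    intro acc b
    simp only [List.foldl_cons, pvStepA, pvKeepA]
    by_cases hs : PySem.Chars.isIn pvMarkerStart l = true
    · simp [hs, ih]
    · by_cases he : PySem.Chars.isIn pvMarkerEnd l = true
      · simp [hs, he, ih]
      · cases b <;> simp [hs, he, ih]

theorem pvKeep_eq_clean : ∀ (lines : List (List Char)),
    pvKeepA false lines = pvCleanB lines ∧ pvKeepA true lines = pvCleanB (pvSkipB lines) := by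
  intro lines
  induction lines with
  | nil => simp [pvKeepA, pvCleanB, pvSkipB]
  | cons l t ih =>
    obtain ⟨ihf, iht⟩ := ih
    constructor
    · simp only [pvKeepA, pvCleanB]
      by_cases hs : PySem.Chars.isIn pvMarkerStart l = true
      · simp [hs, iht]
      · by_cases he : PySem.Chars.isIn pvMarkerEnd l = true
        · simp [hs, he, ihf]
        · simp [hs, he, ihf]
    · simp only [pvKeepA, pvSkipB]
      by_cases hs : PySem.Chars.isIn pvMarkerStart l = true
      · simp [hs, iht]
      · by_cases he : PySem.Chars.isIn pvMarkerEnd l = true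
        · simp [hs, he, ihf]
        · simp [hs, he, iht]

theorem pvDropWhile_eq_drop (l : List (List Char)) (p : List Char → Bool) :
    l.dropWhile p = l.drop (l.takeWhile p).length := by
  conv_rhs => rw [← l.takeWhile_append_dropWhile (p := p)]
  rw [List.drop_append_of_le_length (by simp)]
  simp

-- pop-from-end = take up to the trim index
theorem pvPop_eq_take (r : List (List Char)) :
    (r.reverse.dropWhile (· == [])).reverse
      = r.take (r.length - (r.reverse.takeWhile (· == [])).length) := by
  rw [pvDropWhile_eq_drop, List.reverse_drop]
  simp

-- join over a list ending in the empty piece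
theorem pvJoin_append_nil (t : List (List Char)) (ht : t ≠ []) :
    PySem.Chars.join ['\n'] (t ++ [[]]) = PySem.Chars.join ['\n'] t ++ ['\n'] := by
  induction t with
  | nil => simp at ht
  | cons a t ih =>
    cases t with
    | nil =>
      rw [List.singleton_append, PySem.Chars.join_cons_cons, PySem.Chars.join_singleton,
          PySem.Chars.join_singleton]
      simp
    | cons b t' =>
      have h := ih (by simp)
      simp only [List.cons_append] at h ⊢
      rw [PySem.Chars.join_cons_cons, h, PySem.Chars.join_cons_cons]
      simp

theorem pvEndswith_append (xs : List Char) :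
    PySem.Chars.endswith (xs ++ ['\n']) ['\n'] = true := by
  rw [PySem.Chars.endswith_iff]
  exact List.suffix_append xs ['\n']

theorem pvBlocks_eq :
    (pvBlockedSites.foldl (fun acc site => acc ++ [pvRedirectIp ++ ['\t'] ++ site]) [pvMarkerStart]) ++ [pvMarkerEnd]
      = [pvMarkerStart] ++ pvBlockedSites.map (fun site => pvRedirectIp ++ ['\t'] ++ site) ++ [pvMarkerEnd] := by
  rfl

-- ===== VERDICT (by name: the statement is the Claim_ definition above) =====
theorem add_block_entries_spec : Claim_equal_add_block_entries := by
  intro content _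
  unfold Spec_add_block_entries add_block_entries add_block_entries_alt
  have hk : ((PySem.Chars.splitOn content.toList ['\n']).foldl pvStepA ([], false)).1
      = pvCleanB (PySem.Chars.splitOn content.toList ['\n']) := by
    rw [pvFoldA_eq_keep]
    simpa using (pvKeep_eq_clean (PySem.Chars.splitOn content.toList ['\n'])).1
  simp only [hk, pvPop_eq_take, pvBlocks_eq]
  set kept := pvCleanB (PySem.Chars.splitOn content.toList ['\n']) with hkept
  set t := kept.take (kept.length - (kept.reverse.takeWhile (· == [])).length) with htk
  rcases eq_or_ne t [] with h0 | hne
  · rw [h0]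
    simp [PySem.Chars.join, List.intercalate, PySem.Chars.endswith, List.isSuffixOf]
  · rw [pvJoin_append_nil t hne, pvEndswith_append]
    simp
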